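-- pv_equiv track=rewrite | github.com/evermorewang/Bioinformatics | aachargecal.py | highlight_sequence
-- ===== SOURCE A (Python) =====
-- def highlight_sequence(sequence):
--     """
--     Create a colored representation of the sequence highlighting
--     hydrophobic and hydrophilic amino acids.
--
--     Args:
--         sequence (str): Amino acid sequence in one-letter code
--
--     Returns:
--         str: Formatted string with hydrophobic and hydrophilic highlighting indicators
--     """
--     result = ""
--     hydrophobic = "AVILMFYWCG"
--     hydrophilic = "RHKDESTNQP"
--
--     for aa in sequence:
--         if aa in hydrophobic:
--             result += f"[H]{aa}[/H]"  # Hydrophobic indicator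
--         elif aa in hydrophilic:
--             result += f"[P]{aa}[/P]"  # Hydrophilic (polar) indicator
--         else:
--             result += aa
--
--     return result
-- ===== SOURCE B (Python) =====
-- def highlight_sequence(sequence):
--     """Two-pointer run scanner: copy each maximal untagged run as one slice,
--     emit the wrapped tag at the boundary character, join the parts."""
--     special = {}
--     for c in "AVILMFYWCG":
--         special[c] = f"[H]{c}[/H]"
--     for c in "RHKDESTNQP":
--         special[c] = f"[P]{c}[/P]"
--     parts = []
--     i = 0
--     n = len(sequence)
--     while i < n:
--         j = i
--         while j < n and sequence[j] not in special:
--             j += 1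
--         parts.append(sequence[i:j])
--         if j < n:
--             parts.append(special[sequence[j]])
--             j += 1
--         i = j
--     return "".join(parts)
-- ===== Notes on version B (the rewrite author's own statement) =====
-- stated objective: alternative
-- what changed: B replaces A's per-character if/elif string-append loop by a two-pointer run scanner: it advances an inner pointer past each maximal run of characters not in the tag table, appends that run as one slice, then appends the table's wrapped tag for the boundary character, and joins the collected parts at the end.
import Mathlib
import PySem

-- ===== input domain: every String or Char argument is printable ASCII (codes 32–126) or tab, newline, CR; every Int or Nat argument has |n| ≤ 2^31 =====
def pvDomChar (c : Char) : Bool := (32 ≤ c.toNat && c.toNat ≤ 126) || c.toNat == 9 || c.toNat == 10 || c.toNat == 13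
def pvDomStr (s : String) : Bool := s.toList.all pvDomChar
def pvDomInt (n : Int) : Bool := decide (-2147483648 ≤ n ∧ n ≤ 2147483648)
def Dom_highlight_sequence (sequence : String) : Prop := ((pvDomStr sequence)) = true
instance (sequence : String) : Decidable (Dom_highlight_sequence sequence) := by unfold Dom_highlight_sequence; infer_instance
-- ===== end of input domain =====

-- B replaces A's per-character if/elif append loop by a two-pointer run scanner that
-- copies maximal untagged runs as slices and joins the collected parts (alternative; same O(n) cost).

-- ===== PORT A =====
-- 'aa in hydrophobic' on a single character aa is exactly membership of aa among the string's characters.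
def highlight_sequence (sequence : String) : String :=
  sequence.toList.foldl (fun result aa =>
    if aa ∈ "AVILMFYWCG".toList then
      result ++ "[H]" ++ String.ofList [aa] ++ "[/H]"
    else if aa ∈ "RHKDESTNQP".toList then
      result ++ "[P]" ++ String.ofList [aa] ++ "[/P]"
    else
      result ++ String.ofList [aa]) ""

-- ===== PORT B =====
-- the tag table B builds with its two for-loops
def hsTable : PySem.Dict Char String :=
  let d := "AVILMFYWCG".toList.foldl
    (fun d c => d.insert c ("[H]" ++ String.ofList [c] ++ "[/H]")) PySem.Dict.empty
  "RHKDESTNQP".toList.foldl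
    (fun d c => d.insert c ("[P]" ++ String.ofList [c] ++ "[/P]")) d

-- inner while: advance j past characters not in the table ('sequence[j] not in special')
def hsFind (s : List Char) (j : Nat) : Nat :=
  if h : j < s.length then
    if (hsTable.get? s[j]).isSome then j else hsFind s (j + 1)
  else j
termination_by s.length - j

-- the port of B's outer while cites this bound in its termination proof
lemma hsFind_ge (s : List Char) (j : Nat) : j ≤ hsFind s j := by
  generalize hn : s.length - j = n
  induction n generalizing j with
  | zero =>
      have hj : ¬ j < s.length := by omega
      unfold hsFind; rw [dif_neg hj]
  | succ k ih =>
      unfold hsFind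
      by_cases hj : j < s.length
      · rw [dif_pos hj]
        by_cases hs : (hsTable.get? s[j]).isSome
        · rw [if_pos hs]
        · rw [if_neg hs]
          have := ih (j + 1) (by omega); omega
      · rw [dif_neg hj]

-- outer while over i, collecting 'parts'; 'special[sequence[j]]' is the (always successful)
-- table lookup at the boundary character, ported via Option.getD.
def hsParts (s : List Char) (i : Nat) : List String :=
  if h : i < s.length then
    let j := hsFind s i
    let seg := String.ofList ((s.drop i).take (j - i))   -- sequence[i:j]
    if hj : j < s.length then
      seg :: (hsTable.get? s[j]).getD "" :: hsParts s (j + 1)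
    else [seg]
  else []
termination_by s.length - i
decreasing_by
  have := hsFind_ge s i
  omega

def highlight_sequence_alt (sequence : String) : String :=
  String.join (hsParts sequence.toList 0)

-- ===== PRECONDITION & SPEC =====
def Spec_highlight_sequence (sequence : String) (out : String) : Prop := out = highlight_sequence_alt sequence
instance (sequence : String) (out : String) : Decidable (Spec_highlight_sequence sequence out) := by unfold Spec_highlight_sequence; infer_instance

-- ===== CLAIM (what is proved, stated in full; the proofs are below) =====
def Claim_equal_highlight_sequence : Prop := ∀ (sequence : String), Dom_highlight_sequence sequence → Spec_highlight_sequence sequence (highlight_sequence sequence)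

-- ===== LEMMAS AND PROOFS =====

-- the per-character piece A appends
def hsPieceA (aa : Char) : String :=
  if aa ∈ "AVILMFYWCG".toList then "[H]" ++ String.ofList [aa] ++ "[/H]"
  else if aa ∈ "RHKDESTNQP".toList then "[P]" ++ String.ofList [aa] ++ "[/P]"
  else String.ofList [aa]

lemma hsTable_eq : hsTable = PySem.Dict.mk
    [('A', "[H]A[/H]"), ('V', "[H]V[/H]"), ('I', "[H]I[/H]"), ('L', "[H]L[/H]"), ('M', "[H]M[/H]"), ('F', "[H]F[/H]"), ('Y', "[H]Y[/H]"), ('W', "[H]W[/H]"), ('C', "[H]C[/H]"), ('G', "[H]G[/H]"), ('R', "[P]R[/P]"), ('H', "[P]H[/P]"), ('K', "[P]K[/P]"), ('D', "[P]D[/P]"), ('E', "[P]E[/P]"), ('S', "[P]S[/P]"), ('T', "[P]T[/P]"), ('N', "[P]N[/P]"), ('Q', "[P]Q[/P]"), ('P', "[P]P[/P]")] := by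
  decide

lemma join_cons_aux (l : List String) (a : String) :
    List.foldl (· ++ ·) a l = a ++ String.join l := by
  induction l generalizing a with
  | nil => simp [String.join]
  | cons s l ih =>
    rw [List.foldl_cons, ih]
    conv_rhs => rw [String.join, List.foldl_cons, ih]
    simp [String.append_assoc]

lemma join_cons (s : String) (l : List String) :
    String.join (s :: l) = s ++ String.join l := by
  rw [String.join, List.foldl_cons, join_cons_aux]
  simp

lemma piece_eq (c : Char) : hsPieceA c = hsTable.getD c (String.ofList [c]) := by
  by_cases h1 : c ∈ "AVILMFYWCG".toList
  · have h1' : c ∈ ['A','V','I','L','M','F','Y','W','C','G'] := h1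
    simp only [List.mem_cons, List.not_mem_nil, or_false] at h1'
    rcases h1' with h | h | h | h | h | h | h | h | h | h <;> subst h <;> decide
  · by_cases h2 : c ∈ "RHKDESTNQP".toList
    · have h2' : c ∈ ['R','H','K','D','E','S','T','N','Q','P'] := h2
      simp only [List.mem_cons, List.not_mem_nil, or_false] at h2'
      rcases h2' with h | h | h | h | h | h | h | h | h | h <;> subst h <;> decide
    · have h1' : c ∉ ['A','V','I','L','M','F','Y','W','C','G'] := h1
      have h2' : c ∉ ['R','H','K','D','E','S','T','N','Q','P'] := h2
      simp only [List.mem_cons, List.not_mem_nil, or_false, not_or] at h1' h2'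
      rw [hsPieceA, if_neg h1, if_neg h2, hsTable_eq]
      obtain ⟨a1,a2,a3,a4,a5,a6,a7,a8,a9,a10⟩ := h1'
      obtain ⟨b1,b2,b3,b4,b5,b6,b7,b8,b9,b10⟩ := h2'
      simp [PySem.Dict.getD, PySem.Dict.get?, Ne.symm a1, Ne.symm a2, Ne.symm a3,
        Ne.symm a4, Ne.symm a5, Ne.symm a6, Ne.symm a7, Ne.symm a8, Ne.symm a9, Ne.symm a10,
        Ne.symm b1, Ne.symm b2, Ne.symm b3, Ne.symm b4, Ne.symm b5, Ne.symm b6, Ne.symm b7,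
        Ne.symm b8, Ne.symm b9, Ne.symm b10]

lemma getD_get? (c : Char) (d : String) : hsTable.getD c d = (hsTable.get? c).getD d := by
  simp [PySem.Dict.getD]

lemma piece_plain (c : Char) (h : hsTable.get? c = none) : hsPieceA c = String.ofList [c] := by
  rw [piece_eq, getD_get?, h]; rfl

lemma piece_special (c : Char) (h : (hsTable.get? c).isSome) :
    hsPieceA c = (hsTable.get? c).getD "" := by
  rw [piece_eq, getD_get?]
  cases hx : hsTable.get? c with
  | none => rw [hx] at h; simp at h
  | some t => rfl

lemma stepA_eq : (fun (result : String) (aa : Char) =>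
    if aa ∈ "AVILMFYWCG".toList then result ++ "[H]" ++ String.ofList [aa] ++ "[/H]"
    else if aa ∈ "RHKDESTNQP".toList then result ++ "[P]" ++ String.ofList [aa] ++ "[/P]"
    else result ++ String.ofList [aa])
    = fun (r : String) (c : Char) => r ++ hsPieceA c := by
  funext r c
  unfold hsPieceA
  split_ifs <;> simp [String.append_assoc]

lemma foldl_piece (l : List Char) (acc : String) :
    l.foldl (fun r c => r ++ hsPieceA c) acc = acc ++ String.join (l.map hsPieceA) := by
  induction l generalizing acc with
  | nil => simp [String.join]
  | cons c rest ih =>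
    rw [List.foldl_cons, ih, List.map_cons, join_cons, String.append_assoc]

lemma hsFind_le (s : List Char) (j : Nat) (h : j ≤ s.length) : hsFind s j ≤ s.length := by
  generalize hn : s.length - j = n
  induction n generalizing j with
  | zero =>
      have hj : ¬ j < s.length := by omega
      unfold hsFind; rw [dif_neg hj]; omega
  | succ k ih =>
      unfold hsFind
      by_cases hj : j < s.length
      · rw [dif_pos hj]
        by_cases hs : (hsTable.get? s[j]).isSome
        · rw [if_pos hs]; omega
        · rw [if_neg hs]; exact ih (j + 1) (by omega) (by omega)
      · rw [dif_neg hj]; exact h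

lemma hsFind_plain (s : List Char) (j k : Nat) (h1 : j ≤ k) (h2 : k < hsFind s j)
    (hk : k < s.length) : hsTable.get? s[k] = none := by
  generalize hn : s.length - j = n
  induction n generalizing j with
  | zero =>
      have hj : ¬ j < s.length := by omega
      unfold hsFind at h2; rw [dif_neg hj] at h2
      omega
  | succ m ih =>
      by_cases hj : j < s.length
      · unfold hsFind at h2
        rw [dif_pos hj] at h2
        by_cases hs : (hsTable.get? s[j]).isSome
        · rw [if_pos hs] at h2; omega
        · rw [if_neg hs] at h2
          by_cases hjk : j = k
          · subst hjk; simpa using hs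
          · exact ih (j + 1) (by omega) h2 (by omega)
      · unfold hsFind at h2
        rw [dif_neg hj] at h2
        omega

lemma hsFind_special (s : List Char) (j : Nat) (h : hsFind s j < s.length) :
    (hsTable.get? (s[hsFind s j]'h)).isSome := by
  generalize hn : s.length - j = n
  induction n generalizing j with
  | zero =>
      exfalso
      have hj : ¬ j < s.length := by omega
      have he : hsFind s j = j := by unfold hsFind; rw [dif_neg hj]
      rw [he] at h; omega
  | succ m ih =>
      by_cases hj : j < s.length
      · by_cases hs : (hsTable.get? s[j]).isSome
        · have he : hsFind s j = j := by unfold hsFind; rw [dif_pos hj, if_pos hs]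
          simpa [he] using hs
        · have he : hsFind s j = hsFind s (j + 1) := by
            conv_lhs => rw [hsFind]
            rw [dif_pos hj, if_neg hs]
          have h' : hsFind s (j + 1) < s.length := he ▸ h
          have := ih (j + 1) h' (by omega)
          simpa [he] using this
      · exfalso
        have he : hsFind s j = j := by unfold hsFind; rw [dif_neg hj]
        rw [he] at h; omega

lemma join_map_plain (l : List Char) (h : ∀ c ∈ l, hsTable.get? c = none) :
    String.join (l.map hsPieceA) = String.ofList l := by
  induction l with
  | nil => simp [String.join]
  | cons c rest ih =>
      rw [List.map_cons, join_cons, piece_plain c (h c (by simp)),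
        ih (fun x hx => h x (by simp [hx]))]
      apply String.toList_injective
      simp

lemma join_append (l1 l2 : List String) :
    String.join (l1 ++ l2) = String.join l1 ++ String.join l2 := by
  induction l1 with
  | nil => simp [String.join]
  | cons s l ih => rw [List.cons_append, join_cons, join_cons, ih, String.append_assoc]

lemma hsFind_special' (s : List Char) (i j : Nat) (hj : hsFind s i = j) (h : j < s.length) :
    (hsTable.get? (s[j]'h)).isSome := by
  subst hj
  exact hsFind_special s i h

lemma parts_join_aux (s : List Char) (n : Nat) :
    ∀ i, s.length - i ≤ n →
      String.join (hsParts s i) = String.join ((s.drop i).map hsPieceA) := by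
  induction n with
  | zero =>
      intro i hi
      unfold hsParts
      rw [dif_neg (by omega)]
      simp [List.drop_eq_nil_of_le (by omega : s.length ≤ i), String.join]
  | succ m ih =>
      intro i hi
      by_cases hil : i < s.length
      · unfold hsParts
        rw [dif_pos hil]
        set j := hsFind s i with hj
        clear_value j
        have hge : i ≤ j := by rw [hj]; exact hsFind_ge s i
        have hle : j ≤ s.length := by rw [hj]; exact hsFind_le s i (by omega)
        have hplain : ∀ c ∈ (s.drop i).take (j - i), hsTable.get? c = none := by
          intro c hc
          rw [List.mem_iff_getElem] at hc
          obtain ⟨k, hk, hck⟩ := hc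
          simp only [List.length_take, List.length_drop] at hk
          rw [List.getElem_take, List.getElem_drop] at hck
          subst hck
          refine hsFind_plain s i (i + k) (by omega) ?_ (by omega)
          rw [← hj]; omega
        by_cases hjl : j < s.length
        · rw [dif_pos hjl]
          have hspec : (hsTable.get? (s[j]'hjl)).isSome := hsFind_special' s i j hj.symm hjl
          have hjm : s.length - (j + 1) ≤ m := by
            rw [hj]
            have := hsFind_ge s i
            omega
          have hii : i + (j - i) = j := by omega
          have hsplit : s.drop i = (s.drop i).take (j - i) ++ s.drop j := by
            conv_lhs => rw [← List.take_append_drop (j - i) (s.drop i)]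
            rw [List.drop_drop, hii]
            
          have hdropj : s.drop j = s[j] :: s.drop (j + 1) := List.drop_eq_getElem_cons hjl
          rw [join_cons, join_cons, ih (j + 1) hjm]
          conv_rhs => rw [hsplit, List.map_append, join_append, hdropj, List.map_cons, join_cons]
          rw [join_map_plain _ hplain, piece_special s[j] hspec]
        · rw [dif_neg hjl]
          have htake : (s.drop i).take (j - i) = s.drop i :=
            List.take_of_length_le (by simp; omega)
          rw [htake] at hplain ⊢
          rw [join_cons, join_map_plain _ hplain]
          simp [String.join]
      · unfold hsParts
        rw [dif_neg hil]
        simp [List.drop_eq_nil_of_le (by omega : s.length ≤ i), String.join]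

-- ===== VERDICT (by name: the statement is the Claim_ definition above) =====
theorem highlight_sequence_spec : Claim_equal_highlight_sequence := by
  intro sequence _
  unfold Spec_highlight_sequence highlight_sequence highlight_sequence_alt
  rw [stepA_eq, foldl_piece, parts_join_aux sequence.toList sequence.toList.length 0 (by omega)]
  simp
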